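-- pv_equiv track=rewrite | github.com/nyan-dot/wiki-cli | src/wiki_cli/sep.py | drop_sep_tail_sections
-- ===== SOURCE A (Python) =====
-- def drop_sep_tail_sections(lines: list[str], section_titles: set[str]) -> list[str]:
--     kept: list[str] = []
--     index = 0
--
--     while index < len(lines):
--         line = lines[index]
--         if line.startswith("## ") and line[3:] in section_titles:
--             index += 1
--             while index < len(lines) and not lines[index].startswith("## "):
--                 index += 1
--             continue
--
--         kept.append(line)
--         index += 1
--
--     return kept
-- ===== SOURCE B (Python) =====
-- def drop_sep_tail_sections(lines: list[str], section_titles: set[str]) -> list[str]: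
--     # Partition into segments: a new segment starts at each '## ' header line.
--     segments: list[list[str]] = []
--     current: list[str] = []
--     for line in lines:
--         if line.startswith("## "):
--             segments.append(current)
--             current = [line]
--         else:
--             current.append(line)
--     segments.append(current)
--
--     result: list[str] = []
--     for seg in segments:
--         if seg and seg[0].startswith("## ") and seg[0][3:] in section_titles:
--             continue
--         result.extend(seg)
--     return result
-- ===== Notes on version B (the rewrite author's own statement) =====
-- stated objective: alternative
-- what changed: Replaces the index-driven while loop with a nested scan-ahead skip by a build-segments (split at '## ' headers) / filter-by-header / flatten pass.
import Mathlib
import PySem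

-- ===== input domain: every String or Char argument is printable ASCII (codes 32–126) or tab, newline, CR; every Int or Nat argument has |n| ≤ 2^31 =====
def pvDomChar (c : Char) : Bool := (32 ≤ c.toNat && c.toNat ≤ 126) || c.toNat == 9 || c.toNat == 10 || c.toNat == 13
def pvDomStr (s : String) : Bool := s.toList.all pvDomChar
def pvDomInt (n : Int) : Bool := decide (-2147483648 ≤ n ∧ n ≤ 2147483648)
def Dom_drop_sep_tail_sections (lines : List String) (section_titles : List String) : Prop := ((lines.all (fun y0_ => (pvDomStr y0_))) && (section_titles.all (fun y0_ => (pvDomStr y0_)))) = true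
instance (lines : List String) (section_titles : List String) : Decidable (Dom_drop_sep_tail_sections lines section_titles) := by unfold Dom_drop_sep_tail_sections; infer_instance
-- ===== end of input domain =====

-- B replaces A's index-driven while loop with nested scan-ahead by a split-into-segments /
-- filter-by-header / flatten pass (objective: alternative decomposition, same cost).


-- ===== PORT A =====
-- A's inner while: advance past lines until one starts with "## " (or the list ends)
def pySkipA : List String → List String
  | [] => []
  | l :: rest => if PySem.Str.startswith l "## " then l :: rest else pySkipA rest

-- cited by the outer loop's decreasing_by
theorem pySkipA_length_le (xs : List String) : (pySkipA xs).length ≤ xs.length := by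
  induction xs with
  | nil => simp [pySkipA]
  | cons l rest ih =>
    simp only [pySkipA]
    split
    · simp
    · exact Nat.le_trans ih (Nat.le_succ _)

-- A's outer while loop, with the growing `kept` accumulator
def pyLoopA (titles : List String) (kept : List String) (xs : List String) : List String :=
  match xs with
  | [] => kept
  | line :: rest =>
    if PySem.Str.startswith line "## " && titles.contains (PySem.Str.slice line (some 3) none) then
      pyLoopA titles kept (pySkipA rest)
    else
      pyLoopA titles (kept ++ [line]) rest
termination_by xs.length
decreasing_by
  · exact Nat.lt_succ_of_le (pySkipA_length_le rest)
  · exact Nat.lt_succ_self _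

def drop_sep_tail_sections (lines : List String) (section_titles : List String) : List String :=
  pyLoopA section_titles [] lines

-- ===== PORT B =====
-- body of B's first for loop: start a new segment at a "## " header, else extend the current one
def pvSegStep (st : List (List String) × List String) (line : String) :
    List (List String) × List String :=
  if PySem.Str.startswith line "## " then (st.1 ++ [st.2], [line]) else (st.1, st.2 ++ [line])

-- B's per-segment test: keep unless the segment's first line is a matching "## " header
def pvKeepSeg (titles : List String) (seg : List String) : Bool :=
  match seg with
  | [] => true
  | h :: _ => !(PySem.Str.startswith h "## " && titles.contains (PySem.Str.slice h (some 3) none))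

def drop_sep_tail_sections_alt (lines : List String) (section_titles : List String) : List String :=
  let p := lines.foldl pvSegStep (([] : List (List String)), ([] : List String))
  let segments := p.1 ++ [p.2]
  (segments.filter (pvKeepSeg section_titles)).flatten

-- ===== PRECONDITION & SPEC =====
def Spec_drop_sep_tail_sections (lines : List String) (section_titles : List String) (out : List String) : Prop := out = drop_sep_tail_sections_alt lines section_titles
instance (lines : List String) (section_titles : List String) (out : List String) : Decidable (Spec_drop_sep_tail_sections lines section_titles out) := by unfold Spec_drop_sep_tail_sections; infer_instance

-- ===== CLAIM (what is proved, stated in full; the proofs are below) =====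
def Claim_equal_drop_sep_tail_sections : Prop := ∀ (lines : List String) (section_titles : List String), Dom_drop_sep_tail_sections lines section_titles → Spec_drop_sep_tail_sections lines section_titles (drop_sep_tail_sections lines section_titles)

-- ===== LEMMAS AND PROOFS =====

-- accumulator-free form of A's loop
def fA (titles : List String) (xs : List String) : List String :=
  match xs with
  | [] => []
  | l :: rest =>
    if PySem.Str.startswith l "## " && titles.contains (PySem.Str.slice l (some 3) none) then
      fA titles (pySkipA rest)
    else
      l :: fA titles rest
termination_by xs.length
decreasing_by
  · exact Nat.lt_succ_of_le (pySkipA_length_le rest)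
  · exact Nat.lt_succ_self _

theorem pyLoopA_eq (titles : List String) :
    ∀ n xs kept, xs.length ≤ n → pyLoopA titles kept xs = kept ++ fA titles xs := by
  intro n
  induction n with
  | zero =>
    intro xs kept h
    have : xs = [] := List.length_eq_zero_iff.mp (Nat.le_zero.mp h)
    subst this; simp [pyLoopA, fA]
  | succ n ih =>
    intro xs kept h
    match xs with
    | [] => simp [pyLoopA, fA]
    | l :: rest =>
      simp only [pyLoopA, fA]
      split
      · exact ih _ kept (Nat.le_trans (pySkipA_length_le rest) (Nat.succ_le_succ_iff.mp h))
      · rw [ih rest (kept ++ [l]) (Nat.succ_le_succ_iff.mp h)]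
        simp

theorem pvSegStep_true {l : String} (hl : PySem.Str.startswith l "## " = true)
    (st : List (List String) × List String) : pvSegStep st l = (st.1 ++ [st.2], [l]) := by
  simp only [pvSegStep]
  rw [if_pos hl]

theorem pvSegStep_false {l : String} (hl : PySem.Str.startswith l "## " = false)
    (st : List (List String) × List String) : pvSegStep st l = (st.1, st.2 ++ [l]) := by
  simp only [pvSegStep]
  rw [if_neg (by rw [hl]; decide)]

-- prepend a line onto the first segment
def consFirst (l : String) : List (List String) → List (List String)
  | [] => [[l]]
  | g :: gs => (l :: g) :: gs

-- prepend a whole current segment onto the first segment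
def consApp (cur : List String) : List (List String) → List (List String)
  | [] => [cur]
  | g :: gs => (cur ++ g) :: gs

-- recursive characterization of B's segmentation
def groupsR : List String → List (List String)
  | [] => [[]]
  | l :: rest =>
    if PySem.Str.startswith l "## " then [] :: consFirst l (groupsR rest)
    else consFirst l (groupsR rest)

theorem groupsR_cons (xs : List String) : ∃ g gs, groupsR xs = g :: gs := by
  match xs with
  | [] => exact ⟨[], [], rfl⟩
  | l :: rest =>
    simp only [groupsR]
    split
    · exact ⟨_, _, rfl⟩
    · obtain ⟨g, gs, hg⟩ := groupsR_cons rest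
      rw [hg]; exact ⟨_, _, rfl⟩

theorem fold_eq (xs : List String) : ∀ (segs : List (List String)) (cur : List String),
    (xs.foldl pvSegStep (segs, cur)).1 ++ [(xs.foldl pvSegStep (segs, cur)).2] =
      segs ++ consApp cur (groupsR xs) := by
  induction xs with
  | nil => intro segs cur; simp [groupsR, consApp]
  | cons l rest ih =>
    intro segs cur
    obtain ⟨g, gs, hg⟩ := groupsR_cons rest
    by_cases hl : PySem.Str.startswith l "## " = true
    · rw [List.foldl_cons, pvSegStep_true hl, ih (segs ++ [cur]) [l],
        groupsR, if_pos hl, hg]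
      simp [consApp, consFirst]
    · have hl' : PySem.Str.startswith l "## " = false := Bool.eq_false_iff.mpr hl
      rw [List.foldl_cons, pvSegStep_false hl', ih segs (cur ++ [l]),
        groupsR, if_neg hl, hg]
      simp [consApp, consFirst]

theorem keep_head (titles : List String) (xs : List String) (g : List String)
    (gs : List (List String)) (h : groupsR xs = g :: gs) : pvKeepSeg titles g = true := by
  match xs with
  | [] =>
    simp only [groupsR] at h
    injection h with h1 _; subst h1; rfl
  | l :: rest =>
    simp only [groupsR] at h
    obtain ⟨g', gs', hg⟩ := groupsR_cons rest
    rw [hg] at h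
    by_cases hl : PySem.Str.startswith l "## " = true
    · rw [if_pos hl] at h
      injection h with h1 _; subst h1; rfl
    · rw [if_neg hl] at h
      simp only [consFirst] at h
      injection h with h1 _; subst h1
      have hl' : PySem.Str.startswith l "## " = false := Bool.eq_false_iff.mpr hl
      simp only [pvKeepSeg, hl', Bool.false_and, Bool.not_false]

theorem skip_groups (xs : List String) :
    groupsR (pySkipA xs) = [] :: (groupsR xs).tail ∨
      (pySkipA xs = [] ∧ (groupsR xs).tail = []) := by
  induction xs with
  | nil => right; exact ⟨rfl, rfl⟩
  | cons l rest ih =>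
    obtain ⟨g, gs, hg⟩ := groupsR_cons rest
    by_cases hl : PySem.Str.startswith l "## " = true
    · left
      rw [pySkipA, if_pos hl, groupsR, if_pos hl]
      rfl
    · rw [pySkipA, if_neg hl, groupsR, if_neg hl, hg]
      rw [hg] at ih
      simp only [List.tail_cons] at ih
      simpa [consFirst] using ih

theorem fA_eq (titles : List String) :
    ∀ n xs, xs.length ≤ n → fA titles xs = ((groupsR xs).filter (pvKeepSeg titles)).flatten := by
  intro n
  induction n with
  | zero =>
    intro xs h
    have : xs = [] := List.length_eq_zero_iff.mp (Nat.le_zero.mp h)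
    subst this; simp [fA, groupsR, pvKeepSeg]
  | succ n ih =>
    intro xs h
    match xs with
    | [] => simp [fA, groupsR, pvKeepSeg]
    | l :: rest =>
      have hrest : rest.length ≤ n := Nat.succ_le_succ_iff.mp h
      obtain ⟨g, gs, hg⟩ := groupsR_cons rest
      have hkg : pvKeepSeg titles g = true := keep_head titles rest g gs hg
      have hke : pvKeepSeg titles ([] : List String) = true := rfl
      rw [fA]
      by_cases hc : (PySem.Str.startswith l "## " && titles.contains (PySem.Str.slice l (some 3) none)) = true
      · rw [if_pos hc]
        have hl : PySem.Str.startswith l "## " = true := by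
          by_contra hfalse
          rw [Bool.eq_false_iff.mpr hfalse] at hc
          simp at hc
        have hkl : pvKeepSeg titles (l :: g) = false := by
          simp only [pvKeepSeg, hc, Bool.not_true]
        rw [ih (pySkipA rest) (Nat.le_trans (pySkipA_length_le rest) hrest),
          groupsR, if_pos hl, hg]
        simp only [consFirst]
        rcases skip_groups rest with hs | ⟨hnil, htl⟩
        · rw [hs, hg]
          simp only [List.tail_cons]
          simp [hke, hkl]
        · rw [hg] at htl
          simp only [List.tail_cons] at htl
          subst htl
          rw [hnil]
          simp [groupsR, hke, hkl]
      · rw [if_neg hc]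
        have hc' : (PySem.Str.startswith l "## " && titles.contains (PySem.Str.slice l (some 3) none)) = false :=
          Bool.eq_false_iff.mpr hc
        have hkl : pvKeepSeg titles (l :: g) = true := by
          simp only [pvKeepSeg, hc', Bool.not_false]
        rw [ih rest hrest, hg]
        by_cases hl : PySem.Str.startswith l "## " = true
        · rw [groupsR, if_pos hl, hg]
          simp only [consFirst]
          simp [hke, hkl, hkg]
        · rw [groupsR, if_neg hl, hg]
          simp only [consFirst]
          simp [hkl, hkg]

-- ===== VERDICT (by name: the statement is the Claim_ definition above) =====
theorem drop_sep_tail_sections_spec : Claim_equal_drop_sep_tail_sections := by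
  intro lines titles _
  show drop_sep_tail_sections lines titles = drop_sep_tail_sections_alt lines titles
  rw [drop_sep_tail_sections, pyLoopA_eq titles lines.length lines [] (Nat.le_refl _),
    List.nil_append, fA_eq titles lines.length lines (Nat.le_refl _)]
  simp only [drop_sep_tail_sections_alt]
  rw [fold_eq lines [] []]
  obtain ⟨g, gs, hg⟩ := groupsR_cons lines
  rw [hg]
  simp [consApp]
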